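-- pv_equiv track=rewrite | github.com/croidzen/games | solver.py | check_combi
-- ===== SOURCE A (Python) =====
-- def check_combi(sombi):
--
--     # fill smaller combinations with preceding zeros
--     while len(sombi) < 4:
--         sombi = "0" + sombi
--
--     # positional values
--     A = sombi[0]
--     B = sombi[1]
--     C = sombi[2]
--     D = sombi[3]
--
--     # digit counts
--     zeros = sombi.count("0")
--     ones = sombi.count("1")
--     twos = sombi.count("2")
--     threes = sombi.count("3")
--     fours = sombi.count("4")
--     fives = sombi.count("5")
--     sixes = sombi.count("6")
--     sevens = sombi.count("7")
--     eights = sombi.count("8")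
--     nines = sombi.count("9")
--
--
--     # 9285: One number is correct but wrong placed
--     if not (
--         ((nines!=0) and (twos==0) and (eights==0) and (fives==0) and A!="9")
--         or
--         ((nines==0) and (twos!=0) and (eights==0) and (fives==0) and B!="2")
--         or
--         ((nines==0) and (twos==0) and (eights!=0) and (fives==0) and C!="8")
--         or
--         ((nines==0) and (twos==0) and (eights==0) and (fives!=0) and D!="5")
--         ): return False
--
--
--     # 1937: Two numbers are correct but wrong placed
--     if not (
--         ((ones!=0) and (nines!=0) and (threes==0) and (sevens==0) and A!="1" and B!="9")
--         or
--         ((ones==0) and (nines==0) and (threes!=0) and (sevens!=0) and C!="3" and D!="7")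
--         or
--         ((ones==0) and (nines!=0) and (threes!=0) and (sevens==0) and B!="9" and C!="3")
--         or
--         ((ones!=0) and (nines==0) and (threes==0) and (sevens!=0) and A!="1" and D!="7")
--         or
--         ((ones!=0) and (nines==0) and (threes!=0) and (sevens==0) and A!="1" and C!="3")
--         or
--         ((ones==0) and (nines!=0) and (threes==0) and (sevens!=0) and B!="9" and D!="7")
--         ): return False
--
--
--     # 5201 one number is right and well placed
--     if not (
--         ((A=="5") and (twos==0) and (zeros==0) and (ones==0))
--         or
--         ((fives==0) and (B=="2") and (zeros==0) and (ones==0))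
--         or
--         ((fives==0) and (twos==0) and (C=="0") and (ones==0))
--         or
--         ((fives==0) and (twos==0) and (zeros==0) and (D=="1"))
--         ): return False
--
--
--     # 6507 Nothing is correct
--     if not (
--         (sixes==0) and (fives==0) and (zeros==0) and (sevens==0)
--         ): return False
--
--
--     # 8524 Two numers are correct but wrong placed
--     if not (
--         ((eights!=0) and (fives!=0) and (twos==0) and (fours==0) and A!="8" and B!="5")
--         or
--         ((eights==0) and (fives==0) and (twos!=0) and (fours!=0) and C!="2" and D!="4")
--         or
--         ((eights==0) and (fives!=0) and (twos!=0) and (fours==0) and B!="5" and C!="2")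
--         or
--         ((eights!=0) and (fives==0) and (twos==0) and (fours!=0) and A!="8" and D!="4")
--         or
--         ((eights!=0) and (fives==0) and (twos!=0) and (fours==0) and A!="8" and C!="2")
--         or
--         ((eights==0) and (fives!=0) and (twos==0) and (fours!=0) and B!="5" and D!="4")
--         ): return False
--
--     # Otherwise
--     return True
-- ===== SOURCE B (Python) =====
-- CLUES = [("9285", 0, 1), ("1937", 0, 2), ("5201", 1, 0), ("6507", 0, 0), ("8524", 0, 2)]
--
-- def check_combi(sombi):
--     s = "0" * (4 - len(sombi)) + sombi
--     for g, want_bulls, want_cows in CLUES: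
--         bulls = sum(a == b for a, b in zip(s[:4], g))
--         present = sum(d in s for d in g)
--         if (bulls, present - bulls) != (want_bulls, want_cows):
--             return False
--     return True
-- ===== Notes on version B (the rewrite author's own statement) =====
-- stated objective: simpler
-- what changed: Replaces A's 500-line hand-enumerated case analysis per clue with a generic bulls/cows scorer driven by a clue table (for each clue: bulls over positions 0..3, present-digit count over the whole padded string, cows = present - bulls).
import Mathlib
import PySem

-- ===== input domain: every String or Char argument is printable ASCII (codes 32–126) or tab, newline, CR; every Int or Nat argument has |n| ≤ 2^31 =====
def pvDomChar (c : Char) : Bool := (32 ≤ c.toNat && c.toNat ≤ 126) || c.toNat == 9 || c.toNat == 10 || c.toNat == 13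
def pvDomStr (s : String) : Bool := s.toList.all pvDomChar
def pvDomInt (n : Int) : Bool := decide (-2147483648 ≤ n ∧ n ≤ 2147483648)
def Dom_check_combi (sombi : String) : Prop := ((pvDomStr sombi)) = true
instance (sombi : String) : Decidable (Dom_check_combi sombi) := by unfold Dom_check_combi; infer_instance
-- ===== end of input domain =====

-- B replaces A's hand-enumerated per-clue case analysis by a table-driven bulls/cows scorer (objective: simpler).

-- ===== PORT A =====

-- A's while-loop: prepend '0' while the length is below 4
def padA (l : List Char) : List Char :=
  if l.length < 4 then padA ('0' :: l) else l
  termination_by 4 - l.length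
  decreasing_by simp_all; omega

-- A's body after the padding loop, on the padded character list.
-- padA guarantees length ≥ 4, so Python's sombi[0..3] never raise; getD is exact here.
def checkCoreA (l : List Char) : Bool :=
  let A := l.getD 0 ' '
  let B := l.getD 1 ' '
  let C := l.getD 2 ' '
  let D := l.getD 3 ' '
  let zeros := l.count '0'
  let ones := l.count '1'
  let twos := l.count '2'
  let threes := l.count '3'
  let fours := l.count '4'
  let fives := l.count '5'
  let sixes := l.count '6'
  let sevens := l.count '7'
  let eights := l.count '8'
  let nines := l.count '9'
  if !( ((nines != 0) && (twos == 0) && (eights == 0) && (fives == 0) && (A != '9'))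
      || ((nines == 0) && (twos != 0) && (eights == 0) && (fives == 0) && (B != '2'))
      || ((nines == 0) && (twos == 0) && (eights != 0) && (fives == 0) && (C != '8'))
      || ((nines == 0) && (twos == 0) && (eights == 0) && (fives != 0) && (D != '5')) )
  then false
  else if !( ((ones != 0) && (nines != 0) && (threes == 0) && (sevens == 0) && (A != '1') && (B != '9'))
      || ((ones == 0) && (nines == 0) && (threes != 0) && (sevens != 0) && (C != '3') && (D != '7'))
      || ((ones == 0) && (nines != 0) && (threes != 0) && (sevens == 0) && (B != '9') && (C != '3'))
      || ((ones != 0) && (nines == 0) && (threes == 0) && (sevens != 0) && (A != '1') && (D != '7'))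
      || ((ones != 0) && (nines == 0) && (threes != 0) && (sevens == 0) && (A != '1') && (C != '3'))
      || ((ones == 0) && (nines != 0) && (threes == 0) && (sevens != 0) && (B != '9') && (D != '7')) )
  then false
  else if !( ((A == '5') && (twos == 0) && (zeros == 0) && (ones == 0))
      || ((fives == 0) && (B == '2') && (zeros == 0) && (ones == 0))
      || ((fives == 0) && (twos == 0) && (C == '0') && (ones == 0))
      || ((fives == 0) && (twos == 0) && (zeros == 0) && (D == '1')) )
  then false
  else if !( (sixes == 0) && (fives == 0) && (zeros == 0) && (sevens == 0) )
  then false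
  else if !( ((eights != 0) && (fives != 0) && (twos == 0) && (fours == 0) && (A != '8') && (B != '5'))
      || ((eights == 0) && (fives == 0) && (twos != 0) && (fours != 0) && (C != '2') && (D != '4'))
      || ((eights == 0) && (fives != 0) && (twos != 0) && (fours == 0) && (B != '5') && (C != '2'))
      || ((eights != 0) && (fives == 0) && (twos == 0) && (fours != 0) && (A != '8') && (D != '4'))
      || ((eights != 0) && (fives == 0) && (twos != 0) && (fours == 0) && (A != '8') && (C != '2'))
      || ((eights == 0) && (fives != 0) && (twos == 0) && (fours != 0) && (B != '5') && (D != '4')) )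
  then false
  else true

def check_combi (sombi : String) : Bool :=
  checkCoreA (padA sombi.toList)

-- ===== PORT B =====

-- the clue table of Source B: guess, required bulls, required cows
def cluesB : List (List Char × Nat × Nat) :=
  [(['9','2','8','5'], 0, 1), (['1','9','3','7'], 0, 2), (['5','2','0','1'], 1, 0),
   (['6','5','0','7'], 0, 0), (['8','5','2','4'], 0, 2)]

-- score one clue guess g against the padded candidate s (Source B's loop body)
def scoreOkB (s : List Char) (g : List Char × Nat × Nat) : Bool :=
  let bulls := (List.zipWith (fun a b => a == b) (s.take 4) g.1).count true
  let present := g.1.countP (fun d => s.contains d)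
  (bulls, present - bulls) == (g.2.1, g.2.2)

def check_combi_alt (sombi : String) : Bool :=
  let s := List.replicate (4 - sombi.toList.length) '0' ++ sombi.toList
  cluesB.all (scoreOkB s)

-- ===== PRECONDITION & SPEC =====
def Spec_check_combi (sombi : String) (out : Bool) : Prop := out = check_combi_alt sombi
instance (sombi : String) (out : Bool) : Decidable (Spec_check_combi sombi out) := by unfold Spec_check_combi; infer_instance

-- ===== CLAIM (what is proved, stated in full; the proofs are below) =====
def Claim_equal_check_combi : Prop := ∀ (sombi : String), Dom_check_combi sombi → Spec_check_combi sombi (check_combi sombi)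

-- ===== LEMMAS AND PROOFS =====

theorem padA_eq (l : List Char) : padA l = List.replicate (4 - l.length) '0' ++ l := by
  fun_induction padA with
  | case1 l h ih =>
      rw [ih]
      have : 4 - l.length = (4 - (l.length + 1)) + 1 := by omega
      simp [this, List.replicate_succ']
  | case2 l h =>
      have : 4 - l.length = 0 := by omega
      simp [this]

theorem contains_eq (x : Char) (l : List Char) : l.contains x = !(l.count x == 0) := by
  by_cases h : x ∈ l <;> simp [h, List.count_eq_zero]

theorem pos_count (x p : Char) (l : List Char) (hp : p ∈ l) (h : (p == x) = true) :
    (List.count x l == 0) = false := by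
  have : p = x := by simpa using h
  subst this
  simp [List.count_eq_zero, hp]

theorem ifand_true (c : Bool) : (if (!c) = true then false else true) = c := by
  cases c <;> rfl

theorem ifand (c x : Bool) : (if (!c) = true then false else x) = (c && x) := by
  cases c <;> cases x <;> rfl

theorem core_eq (l : List Char) (hl : 4 ≤ l.length) :
    checkCoreA l = cluesB.all (scoreOkB l) := by
  obtain ⟨a, b, c, d, r, rfl⟩ : ∃ a b c d r, l = a :: b :: c :: d :: r := by
    match l, hl with
    | a :: b :: c :: d :: r, _ => exact ⟨a, b, c, d, r, rfl⟩
  simp only [checkCoreA]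
  rw [ifand, ifand, ifand, ifand, ifand_true]
  simp only [cluesB, scoreOkB, List.all_cons, List.all_nil, List.take,
    List.zipWith, List.countP_cons, List.countP_nil, List.getD, contains_eq,
    Bool.and_true, List.getElem?_cons_zero, List.getElem?_cons_succ, Option.getD_some, bne]
  refine congrArg₂ (· && ·) ?_ (congrArg₂ (· && ·) ?_ (congrArg₂ (· && ·) ?_ (congrArg₂ (· && ·) ?_ ?_)))
  · -- clue 9285
    have h0 : (a == '9') = true → (List.count '9' (a::b::c::d::r) == 0) = false := pos_count '9' a _ (by simp)
    have h1 : (b == '2') = true → (List.count '2' (a::b::c::d::r) == 0) = false := pos_count '2' b _ (by simp)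
    have h2 : (c == '8') = true → (List.count '8' (a::b::c::d::r) == 0) = false := pos_count '8' c _ (by simp)
    have h3 : (d == '5') = true → (List.count '5' (a::b::c::d::r) == 0) = false := pos_count '5' d _ (by simp)
    generalize (a == '9') = e0 at h0 ⊢
    generalize (b == '2') = e1 at h1 ⊢
    generalize (c == '8') = e2 at h2 ⊢
    generalize (d == '5') = e3 at h3 ⊢
    generalize (List.count '9' (a::b::c::d::r) == 0) = m0 at h0 ⊢
    generalize (List.count '2' (a::b::c::d::r) == 0) = m1 at h1 ⊢
    generalize (List.count '8' (a::b::c::d::r) == 0) = m2 at h2 ⊢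
    generalize (List.count '5' (a::b::c::d::r) == 0) = m3 at h3 ⊢
    revert h0 h1 h2 h3; revert e0 e1 e2 e3 m0 m1 m2 m3; decide
  · -- clue 1937
    have h0 : (a == '1') = true → (List.count '1' (a::b::c::d::r) == 0) = false := pos_count '1' a _ (by simp)
    have h1 : (b == '9') = true → (List.count '9' (a::b::c::d::r) == 0) = false := pos_count '9' b _ (by simp)
    have h2 : (c == '3') = true → (List.count '3' (a::b::c::d::r) == 0) = false := pos_count '3' c _ (by simp)
    have h3 : (d == '7') = true → (List.count '7' (a::b::c::d::r) == 0) = false := pos_count '7' d _ (by simp)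
    generalize (a == '1') = e0 at h0 ⊢
    generalize (b == '9') = e1 at h1 ⊢
    generalize (c == '3') = e2 at h2 ⊢
    generalize (d == '7') = e3 at h3 ⊢
    generalize (List.count '1' (a::b::c::d::r) == 0) = m0 at h0 ⊢
    generalize (List.count '9' (a::b::c::d::r) == 0) = m1 at h1 ⊢
    generalize (List.count '3' (a::b::c::d::r) == 0) = m2 at h2 ⊢
    generalize (List.count '7' (a::b::c::d::r) == 0) = m3 at h3 ⊢
    revert h0 h1 h2 h3; revert e0 e1 e2 e3 m0 m1 m2 m3; decide
  · -- clue 5201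
    have h0 : (a == '5') = true → (List.count '5' (a::b::c::d::r) == 0) = false := pos_count '5' a _ (by simp)
    have h1 : (b == '2') = true → (List.count '2' (a::b::c::d::r) == 0) = false := pos_count '2' b _ (by simp)
    have h2 : (c == '0') = true → (List.count '0' (a::b::c::d::r) == 0) = false := pos_count '0' c _ (by simp)
    have h3 : (d == '1') = true → (List.count '1' (a::b::c::d::r) == 0) = false := pos_count '1' d _ (by simp)
    generalize (a == '5') = e0 at h0 ⊢
    generalize (b == '2') = e1 at h1 ⊢
    generalize (c == '0') = e2 at h2 ⊢
    generalize (d == '1') = e3 at h3 ⊢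
    generalize (List.count '5' (a::b::c::d::r) == 0) = m0 at h0 ⊢
    generalize (List.count '2' (a::b::c::d::r) == 0) = m1 at h1 ⊢
    generalize (List.count '0' (a::b::c::d::r) == 0) = m2 at h2 ⊢
    generalize (List.count '1' (a::b::c::d::r) == 0) = m3 at h3 ⊢
    revert h0 h1 h2 h3; revert e0 e1 e2 e3 m0 m1 m2 m3; decide
  · -- clue 6507
    have h0 : (a == '6') = true → (List.count '6' (a::b::c::d::r) == 0) = false := pos_count '6' a _ (by simp)
    have h1 : (b == '5') = true → (List.count '5' (a::b::c::d::r) == 0) = false := pos_count '5' b _ (by simp)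
    have h2 : (c == '0') = true → (List.count '0' (a::b::c::d::r) == 0) = false := pos_count '0' c _ (by simp)
    have h3 : (d == '7') = true → (List.count '7' (a::b::c::d::r) == 0) = false := pos_count '7' d _ (by simp)
    generalize (a == '6') = e0 at h0 ⊢
    generalize (b == '5') = e1 at h1 ⊢
    generalize (c == '0') = e2 at h2 ⊢
    generalize (d == '7') = e3 at h3 ⊢
    generalize (List.count '6' (a::b::c::d::r) == 0) = m0 at h0 ⊢
    generalize (List.count '5' (a::b::c::d::r) == 0) = m1 at h1 ⊢
    generalize (List.count '0' (a::b::c::d::r) == 0) = m2 at h2 ⊢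
    generalize (List.count '7' (a::b::c::d::r) == 0) = m3 at h3 ⊢
    revert h0 h1 h2 h3; revert e0 e1 e2 e3 m0 m1 m2 m3; decide
  · -- clue 8524
    have h0 : (a == '8') = true → (List.count '8' (a::b::c::d::r) == 0) = false := pos_count '8' a _ (by simp)
    have h1 : (b == '5') = true → (List.count '5' (a::b::c::d::r) == 0) = false := pos_count '5' b _ (by simp)
    have h2 : (c == '2') = true → (List.count '2' (a::b::c::d::r) == 0) = false := pos_count '2' c _ (by simp)
    have h3 : (d == '4') = true → (List.count '4' (a::b::c::d::r) == 0) = false := pos_count '4' d _ (by simp)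
    generalize (a == '8') = e0 at h0 ⊢
    generalize (b == '5') = e1 at h1 ⊢
    generalize (c == '2') = e2 at h2 ⊢
    generalize (d == '4') = e3 at h3 ⊢
    generalize (List.count '8' (a::b::c::d::r) == 0) = m0 at h0 ⊢
    generalize (List.count '5' (a::b::c::d::r) == 0) = m1 at h1 ⊢
    generalize (List.count '2' (a::b::c::d::r) == 0) = m2 at h2 ⊢
    generalize (List.count '4' (a::b::c::d::r) == 0) = m3 at h3 ⊢
    revert h0 h1 h2 h3; revert e0 e1 e2 e3 m0 m1 m2 m3; decide

-- ===== VERDICT (by name: the statement is the Claim_ definition above) =====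
theorem check_combi_spec : Claim_equal_check_combi := by
  intro sombi _
  unfold Spec_check_combi check_combi check_combi_alt
  rw [padA_eq]
  exact core_eq _ (by simp; omega)
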